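-- pv_equiv track=rewrite | github.com/RBXPrOfIX/labs | lab2/lab2-5.new.py | rna_to_dna
-- ===== SOURCE A (Python) =====
-- def rna_to_dna(rna_sequence):
--     rna_to_dna_map = {
--         'A': 'T',
--         'U': 'A',
--         'G': 'C',
--         'C': 'G'
--     }
--     dna_first_strand = ''.join(rna_to_dna_map[base] for base in rna_sequence)
--     complement = {
--         'A': 'T',
--         'T': 'A',
--         'G': 'C',
--         'C': 'G'
--     }
--     dna_second_strand = ''.join(complement[base] for base in dna_first_strand)
--     return dna_first_strand, dna_second_strand
-- ===== SOURCE B (Python) =====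
-- def rna_to_dna(rna_sequence):
--     pair = {
--         'A': ('T', 'A'),
--         'U': ('A', 'T'),
--         'G': ('C', 'G'),
--         'C': ('G', 'C')
--     }
--     first = []
--     second = []
--     for base in rna_sequence:
--         f, s = pair[base]
--         first.append(f)
--         second.append(s)
--     return ''.join(first), ''.join(second)
-- ===== Notes on version B (the rewrite author's own statement) =====
-- stated objective: alternative
-- what changed: B builds both strands in a single pass using one base->(first,second) pair table and two accumulators, instead of A's two sequential passes (map RNA to the first strand, then re-scan that strand through a complement map).
import Mathlib
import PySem

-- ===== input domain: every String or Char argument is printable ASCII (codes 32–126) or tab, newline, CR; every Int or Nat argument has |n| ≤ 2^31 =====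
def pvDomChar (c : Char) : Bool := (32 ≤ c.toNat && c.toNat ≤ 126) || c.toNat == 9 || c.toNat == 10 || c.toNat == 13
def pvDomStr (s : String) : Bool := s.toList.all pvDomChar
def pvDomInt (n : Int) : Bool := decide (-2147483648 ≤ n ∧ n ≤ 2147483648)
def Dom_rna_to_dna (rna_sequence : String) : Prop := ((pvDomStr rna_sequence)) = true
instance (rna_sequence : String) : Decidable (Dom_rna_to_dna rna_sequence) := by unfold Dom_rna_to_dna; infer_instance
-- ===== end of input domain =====

-- B computes both strands in one pass over the RNA with a base->(first,second) pair table,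
-- instead of A's two passes; equal return values proved on valid RNA (bases in AUGC).

-- ===== PORT A =====
-- A's rna_to_dna_map; a lookup that misses is a KeyError in Python, excluded by Pre_
def pvMapA : PySem.Dict Char Char :=
  PySem.Dict.ofList [('A','T'), ('U','A'), ('G','C'), ('C','G')]
-- A's complement map
def pvCompA : PySem.Dict Char Char :=
  PySem.Dict.ofList [('A','T'), ('T','A'), ('G','C'), ('C','G')]

def rna_to_dna (rna_sequence : String) : String × String :=
  let dna_first_strand := rna_sequence.toList.map (fun base => pvMapA.getD base '?')
  let dna_second_strand := dna_first_strand.map (fun base => pvCompA.getD base '?')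
  (String.ofList dna_first_strand, String.ofList dna_second_strand)

-- ===== PORT B =====
-- B's pair table: base -> (first-strand char, second-strand char)
def pvPairB : PySem.Dict Char (Char × Char) :=
  PySem.Dict.ofList [('A', ('T','A')), ('U', ('A','T')), ('G', ('C','G')), ('C', ('G','C'))]

def rna_to_dna_alt (rna_sequence : String) : String × String :=
  let acc := rna_sequence.toList.foldl
    (fun (acc : List Char × List Char) base =>
      let p := pvPairB.getD base ('?','?')
      (acc.1 ++ [p.1], acc.2 ++ [p.2]))
    ([], [])
  (String.ofList acc.1, String.ofList acc.2)

-- ===== PRECONDITION & SPEC =====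
-- Pre_ excludes bases outside AUGC, on which the Python A raises KeyError
def Pre_rna_to_dna (rna_sequence : String) : Prop :=
  (rna_sequence.toList.all (fun c => c == 'A' || c == 'U' || c == 'G' || c == 'C')) = true
instance (rna_sequence : String) : Decidable (Pre_rna_to_dna rna_sequence) := by
  unfold Pre_rna_to_dna; infer_instance
def pvWitness_rna_to_dna : String := "AUGC"

def Spec_rna_to_dna (rna_sequence : String) (out : String × String) : Prop := out = rna_to_dna_alt rna_sequence
instance (rna_sequence : String) (out : String × String) : Decidable (Spec_rna_to_dna rna_sequence out) := by unfold Spec_rna_to_dna; infer_instance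

-- ===== CLAIM (what is proved, stated in full; the proofs are below) =====
def Claim_equal_rna_to_dna : Prop := ∀ (rna_sequence : String), Dom_rna_to_dna rna_sequence → Pre_rna_to_dna rna_sequence → Spec_rna_to_dna rna_sequence (rna_to_dna rna_sequence)

-- ===== LEMMAS AND PROOFS =====

-- B's fold with two accumulators is the pair of maps of the pair table's projections
theorem pvFoldShape (l : List Char) (a1 a2 : List Char) :
    l.foldl (fun (acc : List Char × List Char) base =>
        let p := pvPairB.getD base ('?','?')
        (acc.1 ++ [p.1], acc.2 ++ [p.2])) (a1, a2)
    = (a1 ++ l.map (fun b => (pvPairB.getD b ('?','?')).1),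
       a2 ++ l.map (fun b => (pvPairB.getD b ('?','?')).2)) := by
  induction l generalizing a1 a2 with
  | nil => simp
  | cons c l ih => simp [List.foldl_cons, ih]

-- on valid bases the pair table agrees with A's two composed maps
theorem pvPair_fst (c : Char) (h : c = 'A' ∨ c = 'U' ∨ c = 'G' ∨ c = 'C') :
    (pvPairB.getD c ('?','?')).1 = pvMapA.getD c '?' := by
  rcases h with rfl | rfl | rfl | rfl <;> decide

theorem pvPair_snd (c : Char) (h : c = 'A' ∨ c = 'U' ∨ c = 'G' ∨ c = 'C') :
    (pvPairB.getD c ('?','?')).2 = pvCompA.getD (pvMapA.getD c '?') '?' := by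
  rcases h with rfl | rfl | rfl | rfl <;> decide

-- ===== VERDICT (by name: the statement is the Claim_ definition above) =====
theorem rna_to_dna_spec : Claim_equal_rna_to_dna := by
  intro s _ hpre'
  have hpre : ∀ c ∈ s.toList, c = 'A' ∨ c = 'U' ∨ c = 'G' ∨ c = 'C' := by
    intro c hc
    have := List.all_eq_true.mp hpre' c hc
    simp at this; tauto
  unfold Spec_rna_to_dna rna_to_dna rna_to_dna_alt
  rw [pvFoldShape]
  simp only [List.nil_append, List.map_map]
  have h1 : s.toList.map (fun b => (pvPairB.getD b ('?','?')).1)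
      = s.toList.map (fun base => pvMapA.getD base '?') :=
    List.map_congr_left fun c hc => pvPair_fst c (hpre c hc)
  have h2 : s.toList.map (fun b => (pvPairB.getD b ('?','?')).2)
      = s.toList.map ((fun base => pvCompA.getD base '?') ∘ fun base => pvMapA.getD base '?') :=
    List.map_congr_left fun c hc => pvPair_snd c (hpre c hc)
  rw [h1, h2]
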